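-- pv_equiv track=rewrite | github.com/herenever/KoreanAnaphoraResolution | anaphora_dataset/findpoint.py | searchInSentence
-- ===== SOURCE A (Python) =====
-- def searchInSentence(sentence,word):
--     idx = 0
--     word_len = len(word)
--     flag = False
--     for i in range(len(sentence)):
--         if sentence[i:i+word_len] == word:
--             idx = i
--             flag = True
--             break
--     if flag:return idx,idx+word_len
--     else: return -1,-1
-- ===== SOURCE B (Python) =====
-- def searchInSentence(sentence, word):
--     i = sentence.find(word)
--     if i >= 0:
--         return i, i + len(word)
--     return -1, -1
-- ===== Notes on version B (the rewrite author's own statement) =====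
-- stated objective: idiomatic
-- what changed: Replaces the Python-level scan that builds and compares a slice at every position with a single str.find call (C-implemented two-way search), then forms the span from its index.
-- outside the precondition, e.g. on searchInSentence('', ''): A returns (-1, -1), B returns (0, 0)
import Mathlib
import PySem

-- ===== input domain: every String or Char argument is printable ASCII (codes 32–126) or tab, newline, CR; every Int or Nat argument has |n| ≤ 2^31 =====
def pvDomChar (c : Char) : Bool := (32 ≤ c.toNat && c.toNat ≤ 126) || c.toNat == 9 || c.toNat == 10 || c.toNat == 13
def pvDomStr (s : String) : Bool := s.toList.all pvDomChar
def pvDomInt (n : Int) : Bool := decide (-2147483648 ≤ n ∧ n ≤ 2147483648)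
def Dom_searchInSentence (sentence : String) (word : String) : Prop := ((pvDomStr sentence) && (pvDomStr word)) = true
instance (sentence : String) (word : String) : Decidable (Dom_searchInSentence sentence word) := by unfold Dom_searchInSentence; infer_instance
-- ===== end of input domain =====

-- B replaces A's per-position slice-and-compare scan with a single str.find call (idiomatic).

-- ===== PORT A =====
-- the 'for i in range(len(sentence)): if sentence[i:i+word_len] == word: break' loop,
-- as a structural recursion over the index list (break = return at first match)
def pvAScan (s w : List Char) (wl : Int) : List Int → Option Int
  | [] => none
  | i :: rest =>
      if PySem.List.slice s (some i) (some (i + wl)) = w then some i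
      else pvAScan s w wl rest

def searchInSentence (sentence : String) (word : String) : List Int :=
  let wl : Int := PySem.Str.len word
  match pvAScan sentence.toList word.toList wl
      (PySem.List.pyRange 0 (PySem.Str.len sentence) 1) with
  | some i => [i, i + wl]
  | none => [-1, -1]

-- ===== PORT B =====
def searchInSentence_alt (sentence : String) (word : String) : List Int :=
  let i := PySem.Str.find sentence word
  if 0 ≤ i then [i, i + PySem.Str.len word] else [-1, -1]

-- ===== PRECONDITION & SPEC =====
-- Pre_ excludes only the corner (sentence = "", word = ""), where A's loop never runs and
-- returns (-1,-1) while str.find finds the empty word at 0 — both answers are defensible.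
def Pre_searchInSentence (sentence : String) (word : String) : Prop :=
  ¬ (sentence = "" ∧ word = "")
instance (sentence : String) (word : String) : Decidable (Pre_searchInSentence sentence word) := by
  unfold Pre_searchInSentence; infer_instance

def pvWitness_searchInSentence : String × String := ("hello world", "o w")

def Spec_searchInSentence (sentence : String) (word : String) (out : List Int) : Prop := out = searchInSentence_alt sentence word
instance (sentence : String) (word : String) (out : List Int) : Decidable (Spec_searchInSentence sentence word out) := by unfold Spec_searchInSentence; infer_instance

-- ===== CLAIM (what is proved, stated in full; the proofs are below) =====
def Claim_equal_searchInSentence : Prop := ∀ (sentence : String) (word : String), Dom_searchInSentence sentence word → Pre_searchInSentence sentence word → Spec_searchInSentence sentence word (searchInSentence sentence word)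

-- ===== LEMMAS AND PROOFS =====

-- A's slice test at a nonnegative index is exactly "word is a prefix of the drop"
lemma pvSlice_eq_iff (s w : List Char) (i : Int) (hi : 0 ≤ i) :
    PySem.List.slice s (some i) (some (i + (w.length : Int))) = w ↔ w <+: s.drop i.toNat := by
  rw [PySem.List.slice_toNat s hi (by omega)]
  have h1 : (i + (w.length : Int)).toNat - i.toNat = w.length := by omega
  rw [h1]
  constructor
  · intro h; rw [← h]; exact List.take_prefix _ _
  · intro h
    exact (List.prefix_iff_eq_take.mp h).symm

lemma pvScan_none (s w : List Char) (l : List Int)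
    (h : ∀ i ∈ l, ¬ PySem.List.slice s (some i) (some (i + (w.length : Int))) = w) :
    pvAScan s w (w.length : Int) l = none := by
  induction l with
  | nil => rfl
  | cons a t ih =>
      simp only [pvAScan]
      rw [if_neg (h a (by simp))]
      exact ih (fun i hi => h i (by simp [hi]))

lemma pvScan_some (s w : List Char) (F n : Int)
    (hP : PySem.List.slice s (some F) (some (F + (w.length : Int))) = w)
    (hmin : ∀ i, 0 ≤ i → i < F → ¬ PySem.List.slice s (some i) (some (i + (w.length : Int))) = w) :
    ∀ (k : Nat) (a : Int), 0 ≤ a → a ≤ F → F < n → (F - a).toNat = k →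
      pvAScan s w (w.length : Int) (PySem.List.pyRange a n 1) = some F := by
  intro k
  induction k with
  | zero =>
      intro a ha haF hFn hk
      have : a = F := by omega
      subst this
      rw [PySem.List.pyRange_one_cons hFn]
      simp only [pvAScan]
      rw [if_pos hP]
  | succ k ih =>
      intro a ha haF hFn hk
      have haF' : a < F := by omega
      rw [PySem.List.pyRange_one_cons (by omega)]
      simp only [pvAScan]
      rw [if_neg (hmin a ha haF')]
      exact ih (a + 1) (by omega) (by omega) hFn (by omega)

-- ===== VERDICT (by name: the statement is the Claim_ definition above) =====
theorem searchInSentence_spec : Claim_equal_searchInSentence := by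
  intro sentence word _ hpre
  unfold Spec_searchInSentence searchInSentence searchInSentence_alt
  simp only [PySem.Str.len_eq, PySem.Str.find_eq]
  set s := sentence.toList with hs
  set w := word.toList with hw
  set F := PySem.Chars.find s w with hF
  by_cases h0 : 0 ≤ F
  · -- found: both sides give [F, F + |w|]
    obtain ⟨hpre', hmin'⟩ := PySem.Chars.find_spec (s:=s) (sub:=w) h0
    have hP : PySem.List.slice s (some F) (some (F + (w.length : Int))) = w :=
      (pvSlice_eq_iff s w F h0).mpr hpre'
    have hmin : ∀ i, 0 ≤ i → i < F →
        ¬ PySem.List.slice s (some i) (some (i + (w.length : Int))) = w := by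
      intro i hi hiF hcontra
      exact hmin' i.toNat (by omega) ((pvSlice_eq_iff s w i hi).mp hcontra)
    have hFn : F < (s.length : Int) := by
      rcases List.eq_nil_or_concat' w with hwnil | _
      · -- word = "": find = 0, and sentence ≠ "" by Pre_
        have : F = 0 := by rw [hF, hwnil]; exact PySem.Chars.find_nil s
        have hsne : s ≠ [] := by
          intro hcon
          exact hpre ⟨String.toList_eq_nil_iff.mp hcon,
                      String.toList_eq_nil_iff.mp (hw ▸ hwnil)⟩
        have : 0 < s.length := List.length_pos_iff.mpr hsne
        omega
      · have hlen : w.length ≤ (s.drop F.toNat).length := hpre'.length_le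
        have hwpos : 0 < w.length := by
          rename_i hc; obtain ⟨l, a, hwa⟩ := hc; simp [hwa]
        simp only [List.length_drop] at hlen
        omega
    rw [pvScan_some s w F (s.length : Int) hP hmin (F - 0).toNat 0 le_rfl h0 hFn rfl]
    simp [h0]
  · -- not found: A's scan finds no match either
    have hninf : ¬ w <:+: s := by
      intro hcon
      exact h0 ((PySem.Chars.find_nonneg_iff s w).mpr hcon)
    have hnone : pvAScan s w (w.length : Int) (PySem.List.pyRange 0 (s.length : Int) 1) = none := by
      apply pvScan_none
      intro i hi hcontra
      have hi0 : 0 ≤ i := (PySem.List.mem_pyRange_one.mp hi).1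
      have : w <+: s.drop i.toNat := (pvSlice_eq_iff s w i hi0).mp hcontra
      have : PySem.Chars.isIn w s = true :=
        (PySem.Chars.exists_prefix_drop_iff_isIn w s).mp ⟨i.toNat, this⟩
      exact hninf ((PySem.Chars.isIn_iff_infix w s).mp this)
    rw [hnone]
    simp [h0]
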